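-- pv_equiv track=rewrite | github.com/izrik/wodehouse | wodehouse.py | iter_by_two
-- ===== SOURCE A (Python) =====
-- def iter_by_two(i):
--     x = i.__iter__()
--     while True:
--         try:
--             item1 = x.__next__()
--         except StopIteration:
--             break
--         try:
--             item2 = x.__next__()
--         except StopIteration:
--             raise Exception('Items are not in pairs')
--         yield item1, item2
-- ===== SOURCE B (Python) =====
-- def iter_by_two(i):
--     buf = []
--     for item in i:
--         buf.append(item)
--         if len(buf) == 2:
--             yield buf[0], buf[1]
--             buf = []
--     if buf:
--         raise Exception('Items are not in pairs')
-- ===== Notes on version B (the rewrite author's own statement) =====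
-- stated objective: alternative
-- what changed: Replaces A's explicit two-calls-to-__next__ with StopIteration handling by a plain for-loop over single items that accumulates a one-slot buffer and yields when the buffer fills, raising after the loop on a leftover element.
import Mathlib
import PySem

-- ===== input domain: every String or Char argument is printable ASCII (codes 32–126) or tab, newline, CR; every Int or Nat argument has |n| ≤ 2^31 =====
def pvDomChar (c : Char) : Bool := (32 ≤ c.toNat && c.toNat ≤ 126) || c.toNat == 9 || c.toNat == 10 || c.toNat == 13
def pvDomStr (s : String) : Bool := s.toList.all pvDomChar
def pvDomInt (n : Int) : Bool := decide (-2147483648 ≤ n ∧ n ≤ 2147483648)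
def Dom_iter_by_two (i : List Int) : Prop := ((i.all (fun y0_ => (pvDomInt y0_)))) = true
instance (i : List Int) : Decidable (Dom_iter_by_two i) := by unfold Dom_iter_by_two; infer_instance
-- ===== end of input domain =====

-- B is a different decomposition (single-element buffer fold) of the same O(n) pairing; return-value
-- equivalence on even-length lists (on odd-length lists both raise, outside Pre_).

-- ===== PORT A =====
-- A pulls two items at a time from the iterator; on a list this is two-at-a-time structural recursion.
def iter_by_two (i : List Int) : List (Int × Int) :=
  match i with
  | a :: b :: rest => (a, b) :: iter_by_two rest
  | _ => []   -- [x]: A raises Exception here (excluded by Pre_); []: iteration ends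

-- ===== PORT B =====
-- one fold over single items, state = (pairs emitted so far, buffer)
def iterByTwoStep (p : List (Int × Int) × List Int) (item : Int) : List (Int × Int) × List Int :=
  let buf := p.2 ++ [item]
  if buf.length = 2 then (p.1 ++ [(buf[0]!, buf[1]!)], []) else (p.1, buf)

def iter_by_two_alt (i : List Int) : List (Int × Int) :=
  (i.foldl iterByTwoStep ([], [])).1   -- leftover buffer nonempty ⇒ Python B raises (excluded by Pre_)

-- ===== PRECONDITION & SPEC =====
-- Pre_ excludes odd-length lists, on which A (and B) raise Exception('Items are not in pairs').
def Pre_iter_by_two (i : List Int) : Prop := i.length % 2 = 0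
instance (i : List Int) : Decidable (Pre_iter_by_two i) := by unfold Pre_iter_by_two; infer_instance
def pvWitness_iter_by_two : List Int := ([1, 2, 3, 4])
def Spec_iter_by_two (i : List Int) (out : List (Int × Int)) : Prop := out = iter_by_two_alt i
instance (i : List Int) (out : List (Int × Int)) : Decidable (Spec_iter_by_two i out) := by unfold Spec_iter_by_two; infer_instance

-- ===== CLAIM (what is proved, stated in full; the proofs are below) =====
def Claim_equal_iter_by_two : Prop := ∀ (i : List Int), Dom_iter_by_two i → Pre_iter_by_two i → Spec_iter_by_two i (iter_by_two i)

-- ===== LEMMAS AND PROOFS =====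
theorem foldl_pairs : ∀ (l : List Int) (out : List (Int × Int)), l.length % 2 = 0 →
    l.foldl iterByTwoStep (out, []) = (out ++ iter_by_two l, [])
  | [], out, _ => by simp [iter_by_two]
  | [a], _, h => by simp at h
  | a :: b :: rest, out, h => by
      have hr : rest.length % 2 = 0 := by simp [List.length_cons] at h ⊢; omega
      simp only [List.foldl_cons]
      have h1 : iterByTwoStep (out, []) a = (out, [a]) := by simp [iterByTwoStep]
      have h2 : iterByTwoStep (out, [a]) b = (out ++ [(a, b)], []) := by simp [iterByTwoStep]
      rw [h1, h2, foldl_pairs rest (out ++ [(a, b)]) hr]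
      simp [iter_by_two]

-- ===== VERDICT (by name: the statement is the Claim_ definition above) =====
theorem iter_by_two_spec : Claim_equal_iter_by_two := by
  intro i _ hpre
  unfold Spec_iter_by_two iter_by_two_alt
  rw [foldl_pairs i [] hpre]
  simp
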